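-- pv_equiv track=rewrite | github.com/kkuchi/atCoder_training | algorythm/BFS/agc033_A/main.py | calc
-- ===== SOURCE A (Python) =====
-- from collections import deque
--
-- def calc(h, w, grid):
--     # 黒からの最短距離。初期値は-1
--     dist = [[-1 for _ in range(w)] for _ in range(h)]
--     # キュー
--     q = deque()
--
--     for h_ in range(h):
--         for w_ in range(w):
--             if grid[h_][w_] == '#':
--                 # 黒の座標をキューに
--                 q.append((h_, w_))
--                 # 黒の座標のdistを0に
--                 dist[h_][w_] = 0
--
--     # 深さ(操作回数)
--     d = 0
--     # キューがなくなるまで繰り返し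
--     while q:
--         # キューから座標取り出し
--         height, width = q.popleft()
--         # キューから取り出した座標の深さ（操作回数）
--         d = dist[height][width]
--         # 隣接マスのチェック
--         for dy, dx in ((1,0), (0,1), (-1, 0), (0, -1)):
--             # 隣接マスの座標
--             new_h = height + dy
--             new_w = width + dx
--             # 隣接マスの座標がなければ飛ばす
--             if new_h < 0 or h <= new_h or new_w < 0 or w <= new_w:
--                 continue
--             # 隣接マスが未探索なら
--             if dist[new_h][new_w] == -1:
--                 # 現在の座標のdist+1を隣接マスに
--                 dist[new_h][new_w] = d+1
--                 # 隣接マスをキューに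
--                 q.append((new_h, new_w))
--
--     return d
-- ===== SOURCE B (Python) =====
-- def calc(h, w, grid):
--     # With no obstacles, the BFS distance from the black cells equals the
--     # Manhattan distance to the nearest '#': take the max of that over the grid.
--     blacks = [(i, j) for i in range(h) for j in range(w) if grid[i][j] == '#']
--     if not blacks:
--         return 0
--     best = 0
--     for i in range(h):
--         for j in range(w):
--             nearest = min(abs(i - bi) + abs(j - bj) for bi, bj in blacks)
--             if nearest > best:
--                 best = nearest
--     return best
-- ===== Notes on version B (the rewrite author's own statement) =====
-- stated objective: simpler
-- what changed: A runs a multi-source BFS with a deque and a mutable distance grid and returns the distance of the last dequeued cell; B has no queue and no mutable state: since the grid has no obstacles the BFS distance is the Manhattan distance to the nearest '#', so B collects the black cells once and returns the maximum over all cells of the minimum Manhattan distance to a black cell (0 if there is none).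
import Mathlib
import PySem

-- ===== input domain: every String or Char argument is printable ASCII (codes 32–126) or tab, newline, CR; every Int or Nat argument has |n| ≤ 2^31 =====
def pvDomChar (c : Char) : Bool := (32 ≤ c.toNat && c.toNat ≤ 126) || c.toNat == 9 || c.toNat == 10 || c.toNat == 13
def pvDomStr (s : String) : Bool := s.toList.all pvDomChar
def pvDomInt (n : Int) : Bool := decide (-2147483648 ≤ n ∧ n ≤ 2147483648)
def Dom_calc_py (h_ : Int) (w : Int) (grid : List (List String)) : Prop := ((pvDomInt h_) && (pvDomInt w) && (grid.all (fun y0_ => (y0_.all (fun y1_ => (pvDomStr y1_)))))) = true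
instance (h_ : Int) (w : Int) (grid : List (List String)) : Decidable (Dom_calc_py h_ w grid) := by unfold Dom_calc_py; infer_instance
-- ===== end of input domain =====

-- B replaces A's multi-source BFS (deque + mutable distance grid) by a direct
-- max-over-cells of the min Manhattan distance to a black cell (equal because the
-- grid has no obstacles); objective: simpler, no queue and no mutable state.


-- grid[i][j] for 0 ≤ i, j (both Pythons only read the grid at nonnegative in-range indices)
def cellAt (grid : List (List String)) (i j : Int) : String :=
  (grid.getD i.toNat []).getD j.toNat ""

-- ===== PORT A =====
-- dist[i][j] read/write (indices are nonnegative and in range whenever A reaches them)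
def getCell (dist : List (List Int)) (i j : Int) : Int :=
  (dist.getD i.toNat []).getD j.toNat (-1)

def setCell (dist : List (List Int)) (i j : Int) (v : Int) : List (List Int) :=
  dist.set i.toNat ((dist.getD i.toNat []).set j.toNat v)

-- body of A's `for dy, dx in ((1,0),(0,1),(-1,0),(0,-1))` loop
def bfsStep (h w hh ww d : Int) (st : List (List Int) × List (Int × Int)) (dir : Int × Int) :
    List (List Int) × List (Int × Int) :=
  let nh := hh + dir.1
  let nw := ww + dir.2
  if nh < 0 ∨ h ≤ nh ∨ nw < 0 ∨ w ≤ nw then st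
  else if getCell st.1 nh nw = -1 then
    (setCell st.1 nh nw (d + 1), st.2 ++ [(nh, nw)])
  else st

-- A's `while q:` loop; the fuel only makes the recursion structural (it is proved
-- large enough to never run out on the states A reaches)
def bfsLoop (h w : Int) : Nat → List (List Int) → List (Int × Int) → Int → Int
  | 0, _, _, d => d
  | fuel + 1, dist, q, d =>
    match q with
    | [] => d
    | (hh, ww) :: rest =>
      let d' := getCell dist hh ww
      let st := [((1 : Int), (0 : Int)), (0, 1), (-1, 0), (0, -1)].foldl
        (bfsStep h w hh ww d') (dist, rest)
      bfsLoop h w fuel st.1 st.2 d'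

def calc_py (h_ : Int) (w : Int) (grid : List (List String)) : Int :=
  let H := h_.toNat
  let W := w.toNat
  let dist0 := (List.range H).map (fun _ => List.replicate W (-1 : Int))
  let st := (List.range H).foldl (fun st (i : Nat) =>
      (List.range W).foldl (fun st (j : Nat) =>
        if cellAt grid (i : Int) (j : Int) = "#" then
          (setCell st.1 (i : Int) (j : Int) 0, st.2 ++ [((i : Int), (j : Int))])
        else st) st)
    (dist0, ([] : List (Int × Int)))
  bfsLoop h_ w (6 * (H * W) + 1) st.1 st.2 0

-- ===== PORT B =====
-- abs(i - bi) + abs(j - bj)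
def mdist (c b : Int × Int) : Int := |c.1 - b.1| + |c.2 - b.2|

-- [(i, j) for i in range(h) for j in range(w) if grid[i][j] == '#']
def blacksOf (h w : Int) (grid : List (List String)) : List (Int × Int) :=
  (PySem.List.pyRange 0 h 1).flatMap fun i =>
    ((PySem.List.pyRange 0 w 1).filter fun j => cellAt grid i j = "#").map fun j => (i, j)

-- min(abs(i - bi) + abs(j - bj) for bi, bj in blacks)  (blacks nonempty)
def nearMin (c : Int × Int) : List (Int × Int) → Int
  | [] => 0
  | b :: bs => bs.foldl (fun m x => min m (mdist c x)) (mdist c b)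

def calc_py_alt (h_ : Int) (w : Int) (grid : List (List String)) : Int :=
  let blacks := blacksOf h_ w grid
  match blacks with
  | [] => 0
  | _ :: _ =>
    (PySem.List.pyRange 0 h_ 1).foldl (fun best i =>
      (PySem.List.pyRange 0 w 1).foldl (fun best j =>
        let nearest := nearMin (i, j) blacks
        if best < nearest then nearest else best) best) 0

-- ===== PRECONDITION & SPEC =====
-- Pre_ excludes exactly the inputs on which A raises an IndexError: when w > 0,
-- each row index below h must exist in grid and have at least w cells.
def Pre_calc_py (h_ : Int) (w : Int) (grid : List (List String)) : Prop :=
  0 < w → 0 < h_ → h_ ≤ grid.length ∧ ∀ r ∈ grid.take h_.toNat, w ≤ (r.length : Int)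
instance (h_ : Int) (w : Int) (grid : List (List String)) : Decidable (Pre_calc_py h_ w grid) := by
  unfold Pre_calc_py; infer_instance

def pvWitness_calc_py : Int × Int × List (List String) := (2, 2, [["#", "."], [".", "."]])

def Spec_calc_py (h_ : Int) (w : Int) (grid : List (List String)) (out : Int) : Prop := out = calc_py_alt h_ w grid
instance (h_ : Int) (w : Int) (grid : List (List String)) (out : Int) : Decidable (Spec_calc_py h_ w grid out) := by unfold Spec_calc_py; infer_instance

-- ===== CLAIM (what is proved, stated in full; the proofs are below) =====
def Claim_equal_calc_py : Prop := ∀ (h_ : Int) (w : Int) (grid : List (List String)), Dom_calc_py h_ w grid → Pre_calc_py h_ w grid → Spec_calc_py h_ w grid (calc_py h_ w grid)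

-- ===== LEMMAS AND PROOFS =====

-- the h×w rectangle of cells
def inRect (h w : Int) (c : Int × Int) : Prop := 0 ≤ c.1 ∧ c.1 < h ∧ 0 ≤ c.2 ∧ c.2 < w

def rectL (h w : Int) : List (Int × Int) :=
  (List.range h.toNat).flatMap fun (i : Nat) =>
    (List.range w.toNat).map fun (j : Nat) => ((i : Int), (j : Int))

def unsetCnt (h w : Int) (dist : List (List Int)) : Nat :=
  ((rectL h w).filter (fun c => decide (getCell dist c.1 c.2 = -1))).length

def nbrs (c : Int × Int) : List (Int × Int) :=
  [(c.1 + 1, c.2), (c.1, c.2 + 1), (c.1 - 1, c.2), (c.1, c.2 - 1)]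

def Dims (h w : Int) (dist : List (List Int)) : Prop :=
  dist.length = h.toNat ∧ ∀ r ∈ dist, r.length = w.toNat

-- the BFS loop invariant
structure BfsInv (h w : Int) (grid : List (List String)) (dist : List (List Int))
    (q : List (Int × Int)) (d : Int) : Prop where
  dims : Dims h w dist
  vals : ∀ c, inRect h w c → getCell dist c.1 c.2 = -1 ∨
      getCell dist c.1 c.2 = nearMin c (blacksOf h w grid)
  seeds : ∀ s ∈ blacksOf h w grid, getCell dist s.1 s.2 ≠ -1
  qmem : ∀ c ∈ q, inRect h w c ∧ getCell dist c.1 c.2 = nearMin c (blacksOf h w grid)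
  nodup : q.Nodup
  proc : ∀ c, inRect h w c → getCell dist c.1 c.2 ≠ -1 → c ∉ q →
      ∀ n ∈ nbrs c, inRect h w n → getCell dist n.1 n.2 ≠ -1
  dpos : 0 ≤ d
  dbound : ∀ c, inRect h w c → getCell dist c.1 c.2 ≠ -1 → c ∉ q →
      nearMin c (blacksOf h w grid) ≤ d
  dwit : d = 0 ∨ ∃ c, inRect h w c ∧ getCell dist c.1 c.2 ≠ -1 ∧ c ∉ q ∧
      nearMin c (blacksOf h w grid) = d
  shape : q = [] ∨ ∃ k qa qb, q = qa ++ qb ∧ qa ≠ [] ∧ d ≤ k ∧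
      (∀ c ∈ qa, nearMin c (blacksOf h w grid) = k) ∧
      (∀ c ∈ qb, nearMin c (blacksOf h w grid) = k + 1) ∧
      (∀ c, inRect h w c → nearMin c (blacksOf h w grid) ≤ k → getCell dist c.1 c.2 ≠ -1)

-- characterisation of the answer; it pins the result down uniquely
def ResChar (h w : Int) (grid : List (List String)) (r : Int) : Prop :=
  0 ≤ r ∧ (∀ c, inRect h w c → nearMin c (blacksOf h w grid) ≤ r) ∧
    (r = 0 ∨ ∃ c, inRect h w c ∧ nearMin c (blacksOf h w grid) = r)

lemma char_unique {h w : Int} {grid : List (List String)} {r r' : Int}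
    (h1 : ResChar h w grid r) (h2 : ResChar h w grid r') : r = r' := by
  obtain ⟨p1, c1, w1⟩ := h1
  obtain ⟨p2, c2, w2⟩ := h2
  have hle : r ≤ r' := by
    rcases w1 with rfl | ⟨c, hc, hcv⟩
    · exact p2
    · exact hcv ▸ c2 c hc
  have hge : r' ≤ r := by
    rcases w2 with rfl | ⟨c, hc, hcv⟩
    · exact p1
    · exact hcv ▸ c1 c hc
  omega

-- ---- nearMin / mdist facts ----
lemma mdist_nonneg (c b : Int × Int) : 0 ≤ mdist c b := by
  unfold mdist; positivity

lemma foldl_min_le_start (c : Int × Int) (l : List (Int × Int)) (a : Int) :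
    l.foldl (fun m x => min m (mdist c x)) a ≤ a := by
  induction l generalizing a with
  | nil => simp
  | cons x t ih => exact le_trans (ih _) (min_le_left _ _)

lemma foldl_min_le_mem (c : Int × Int) (l : List (Int × Int)) (a : Int) (b : Int × Int)
    (hb : b ∈ l) : l.foldl (fun m x => min m (mdist c x)) a ≤ mdist c b := by
  induction l generalizing a with
  | nil => simp at hb
  | cons x t ih =>
    rcases List.mem_cons.mp hb with rfl | hb'
    · exact le_trans (foldl_min_le_start c t _) (min_le_right _ _)
    · exact ih _ hb'

lemma le_foldl_min (c : Int × Int) (l : List (Int × Int)) (a v : Int)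
    (ha : v ≤ a) (hl : ∀ b ∈ l, v ≤ mdist c b) :
    v ≤ l.foldl (fun m x => min m (mdist c x)) a := by
  induction l generalizing a with
  | nil => simpa
  | cons x t ih =>
    exact ih _ (le_min ha (hl x (List.mem_cons_self))) (fun b hb => hl b (List.mem_cons_of_mem _ hb))

lemma foldl_min_attained (c : Int × Int) (l : List (Int × Int)) (a : Int) :
    l.foldl (fun m x => min m (mdist c x)) a = a ∨
      ∃ b ∈ l, l.foldl (fun m x => min m (mdist c x)) a = mdist c b := by
  induction l generalizing a with
  | nil => left; rfl
  | cons x t ih =>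
    rcases ih (min a (mdist c x)) with h | ⟨b, hb, hbv⟩
    · rcases le_total a (mdist c x) with hax | hax
      · left; simpa [min_eq_left hax] using h
      · right; exact ⟨x, List.mem_cons_self, by simpa [min_eq_right hax] using h⟩
    · right; exact ⟨b, List.mem_cons_of_mem _ hb, hbv⟩

lemma nearMin_le {c b : Int × Int} {S : List (Int × Int)} (hb : b ∈ S) :
    nearMin c S ≤ mdist c b := by
  cases S with
  | nil => simp at hb
  | cons s t =>
    unfold nearMin
    rcases List.mem_cons.mp hb with rfl | hb'
    · exact foldl_min_le_start c t _
    · exact foldl_min_le_mem c t _ b hb'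

lemma nearMin_attained {c : Int × Int} {S : List (Int × Int)} (hS : S ≠ []) :
    ∃ b ∈ S, nearMin c S = mdist c b := by
  cases S with
  | nil => exact absurd rfl hS
  | cons s t =>
    unfold nearMin
    rcases foldl_min_attained c t (mdist c s) with h | ⟨b, hb, hbv⟩
    · exact ⟨s, List.mem_cons_self, h⟩
    · exact ⟨b, List.mem_cons_of_mem _ hb, hbv⟩

lemma le_nearMin {c : Int × Int} {S : List (Int × Int)} {v : Int}
    (hl : ∀ b ∈ S, v ≤ mdist c b) (hS : S ≠ []) : v ≤ nearMin c S := by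
  cases S with
  | nil => exact absurd rfl hS
  | cons s t =>
    unfold nearMin
    exact le_foldl_min c t _ v (hl s List.mem_cons_self) (fun b hb => hl b (List.mem_cons_of_mem _ hb))

lemma nearMin_nonneg {c : Int × Int} {S : List (Int × Int)} (hS : S ≠ []) :
    0 ≤ nearMin c S :=
  le_nearMin (fun b _ => mdist_nonneg c b) hS

lemma nearMin_mem_zero {c : Int × Int} {S : List (Int × Int)} (hc : c ∈ S) :
    nearMin c S = 0 :=
  le_antisymm (by simpa [mdist] using nearMin_le (c := c) hc)
    (le_nearMin (fun b _ => mdist_nonneg c b) (by rintro rfl; simp at hc))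

lemma nearMin_eq_zero_mem {c : Int × Int} {S : List (Int × Int)} (hS : S ≠ [])
    (h0 : nearMin c S = 0) : c ∈ S := by
  obtain ⟨b, hb, hbv⟩ := nearMin_attained (c := c) hS
  have : mdist c b = 0 := by omega
  have hcb : c = b := by
    unfold mdist at this
    have a1 := abs_nonneg (c.1 - b.1)
    have a2 := abs_nonneg (c.2 - b.2)
    have e1 : |c.1 - b.1| = 0 := by omega
    have e2 : |c.2 - b.2| = 0 := by omega
    rw [abs_eq_zero] at e1 e2
    exact Prod.ext (by omega) (by omega)
  exact hcb ▸ hb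

lemma mem_nbrs_mdist {n c : Int × Int} (hn : n ∈ nbrs c) (b : Int × Int) :
    mdist n b ≤ mdist c b + 1 ∧ mdist c b ≤ mdist n b + 1 := by
  simp only [nbrs, List.mem_cons, List.not_mem_nil, or_false] at hn
  have n1 := abs_nonneg (c.1 + 1 - b.1); have n2 := abs_nonneg (c.1 - 1 - b.1)
  have n3 := abs_nonneg (c.2 + 1 - b.2); have n4 := abs_nonneg (c.2 - 1 - b.2)
  have n5 := abs_nonneg (c.1 - b.1); have n6 := abs_nonneg (c.2 - b.2)
  rcases hn with rfl | rfl | rfl | rfl <;>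
    (simp only [mdist]
     rcases abs_choice (c.1 + 1 - b.1) with e | e <;> rcases abs_choice (c.1 - 1 - b.1) with e' | e' <;>
       rcases abs_choice (c.2 + 1 - b.2) with f | f <;> rcases abs_choice (c.2 - 1 - b.2) with f' | f' <;>
       rcases abs_choice (c.1 - b.1) with g | g <;> rcases abs_choice (c.2 - b.2) with g' | g' <;>
       constructor <;> omega)

lemma nbrs_symm {n c : Int × Int} (hn : n ∈ nbrs c) : c ∈ nbrs n := by
  simp only [nbrs, List.mem_cons, List.not_mem_nil, or_false] at hn ⊢
  rcases hn with rfl | rfl | rfl | rfl <;> simp [Prod.ext_iff] <;> omega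

lemma nearMin_nbr_le {n c : Int × Int} {S : List (Int × Int)} (hS : S ≠ [])
    (hn : n ∈ nbrs c) : nearMin n S ≤ nearMin c S + 1 := by
  obtain ⟨b, hb, hbv⟩ := nearMin_attained (c := c) hS
  calc nearMin n S ≤ mdist n b := nearMin_le hb
    _ ≤ mdist c b + 1 := (mem_nbrs_mdist hn b).1
    _ = nearMin c S + 1 := by omega

-- the geometric step: a cell at positive distance has an in-rectangle neighbour one closer
lemma exists_nbr_closer {h w : Int} {S : List (Int × Int)} {c : Int × Int}
    (hS : S ≠ []) (hSr : ∀ b ∈ S, inRect h w b) (hc : inRect h w c)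
    (hpos : 0 < nearMin c S) :
    ∃ n ∈ nbrs c, inRect h w n ∧ nearMin n S = nearMin c S - 1 := by
  obtain ⟨b, hb, hbv⟩ := nearMin_attained (c := c) hS
  obtain ⟨hb1, hb2, hb3, hb4⟩ := hSr b hb
  obtain ⟨hc1, hc2, hc3, hc4⟩ := hc
  have hne : c ≠ b := by
    rintro rfl
    have := nearMin_mem_zero hb
    omega
  -- pick the step towards b
  have hstep : ∃ n ∈ nbrs c, inRect h w n ∧ mdist n b = mdist c b - 1 := by
    rcases lt_trichotomy c.1 b.1 with h1 | h1 | h1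
    · refine ⟨(c.1 + 1, c.2), by simp [nbrs], ⟨by omega, by omega, hc3, hc4⟩, ?_⟩
      simp only [mdist]
      have n1 := abs_nonneg (c.1 + 1 - b.1); have n2 := abs_nonneg (c.1 - b.1)
      rcases abs_choice (c.1 + 1 - b.1) with e | e <;> rcases abs_choice (c.1 - b.1) with g | g <;> omega
    · rcases lt_trichotomy c.2 b.2 with h2 | h2 | h2
      · refine ⟨(c.1, c.2 + 1), by simp [nbrs], ⟨hc1, hc2, by omega, by omega⟩, ?_⟩
        simp only [mdist]
        have n1 := abs_nonneg (c.2 + 1 - b.2); have n2 := abs_nonneg (c.2 - b.2)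
        rcases abs_choice (c.2 + 1 - b.2) with e | e <;> rcases abs_choice (c.2 - b.2) with g | g <;> omega
      · exact absurd (Prod.ext h1 h2) hne
      · refine ⟨(c.1, c.2 - 1), by simp [nbrs], ⟨hc1, hc2, by omega, by omega⟩, ?_⟩
        simp only [mdist]
        have n1 := abs_nonneg (c.2 - 1 - b.2); have n2 := abs_nonneg (c.2 - b.2)
        rcases abs_choice (c.2 - 1 - b.2) with e | e <;> rcases abs_choice (c.2 - b.2) with g | g <;> omega
    · refine ⟨(c.1 - 1, c.2), by simp [nbrs], ⟨by omega, by omega, hc3, hc4⟩, ?_⟩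
      simp only [mdist]
      have n1 := abs_nonneg (c.1 - 1 - b.1); have n2 := abs_nonneg (c.1 - b.1)
      rcases abs_choice (c.1 - 1 - b.1) with e | e <;> rcases abs_choice (c.1 - b.1) with g | g <;> omega
  obtain ⟨n, hnmem, hnrect, hnd⟩ := hstep
  refine ⟨n, hnmem, hnrect, le_antisymm ?_ ?_⟩
  · calc nearMin n S ≤ mdist n b := nearMin_le hb
      _ = nearMin c S - 1 := by omega
  · have : nearMin c S ≤ nearMin n S + 1 := nearMin_nbr_le hS (nbrs_symm hnmem)
    omega

-- ---- rectL / blacksOf facts ----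
lemma pyRange_toNat (h : Int) :
    PySem.List.pyRange 0 h 1 = (List.range h.toNat).map (fun i : Nat => (i : Int)) := by
  rcases le_or_gt 0 h with hh | hh
  · have := PySem.List.pyRange_zero_natCast h.toNat
    rwa [Int.toNat_of_nonneg hh] at this
  · have h1 : PySem.List.pyRange 0 h 1 = [] := by
      unfold PySem.List.pyRange; simp; omega
    have h2 : h.toNat = 0 := by omega
    simp [h1, h2]

lemma mem_rectL {h w : Int} {c : Int × Int} : c ∈ rectL h w ↔ inRect h w c := by
  unfold rectL inRect
  constructor
  · intro hc
    obtain ⟨i, hi, hc2⟩ := List.mem_flatMap.mp hc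
    obtain ⟨j, hj, rfl⟩ := List.mem_map.mp hc2
    rw [List.mem_range] at hi hj
    exact ⟨by omega, by omega, by omega, by omega⟩
  · rintro ⟨h1, h2, h3, h4⟩
    refine List.mem_flatMap.mpr ⟨c.1.toNat, List.mem_range.mpr (by omega),
      List.mem_map.mpr ⟨c.2.toNat, List.mem_range.mpr (by omega), ?_⟩⟩
    rw [Prod.ext_iff]
    constructor <;> simp <;> omega

lemma nodup_rectL (h w : Int) : (rectL h w).Nodup := by
  unfold rectL
  refine List.nodup_flatMap.mpr ⟨fun i _ => ?_, ?_⟩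
  · exact (List.nodup_range).map (fun a b hab => by
      simpa using congrArg Prod.snd hab)
  · refine List.nodup_range.imp ?_
    intro i j hij a hai haj
    obtain ⟨x, _, rfl⟩ := List.mem_map.mp hai
    obtain ⟨y, _, hy⟩ := List.mem_map.mp haj
    apply hij
    have := congrArg Prod.fst hy
    simp at this
    omega

lemma length_rectL (h w : Int) : (rectL h w).length = h.toNat * w.toNat := by
  unfold rectL
  rw [List.length_flatMap]
  simp

lemma mem_blacksOf {h w : Int} {grid : List (List String)} {c : Int × Int} :
    c ∈ blacksOf h w grid ↔ inRect h w c ∧ cellAt grid c.1 c.2 = "#" := by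
  unfold blacksOf inRect
  rw [pyRange_toNat h, pyRange_toNat w]
  constructor
  · intro hc
    obtain ⟨i, hi, hc2⟩ := List.mem_flatMap.mp hc
    obtain ⟨j, hj2, rfl⟩ := List.mem_map.mp hc2
    obtain ⟨hj, hcell⟩ := List.mem_filter.mp hj2
    obtain ⟨x, hx, rfl⟩ := List.mem_map.mp hi
    obtain ⟨y, hy, rfl⟩ := List.mem_map.mp hj
    rw [List.mem_range] at hx hy
    exact ⟨⟨by omega, by omega, by omega, by omega⟩, by simpa using hcell⟩
  · rintro ⟨⟨h1, h2, h3, h4⟩, hcell⟩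
    refine List.mem_flatMap.mpr ⟨c.1, List.mem_map.mpr ⟨c.1.toNat, List.mem_range.mpr (by omega), by omega⟩,
      List.mem_map.mpr ⟨c.2, List.mem_filter.mpr ⟨List.mem_map.mpr ⟨c.2.toNat, List.mem_range.mpr (by omega), by omega⟩, by simpa using hcell⟩, rfl⟩⟩

lemma nodup_blacksOf (h w : Int) (grid : List (List String)) : (blacksOf h w grid).Nodup := by
  unfold blacksOf
  rw [pyRange_toNat h, pyRange_toNat w]
  refine List.nodup_flatMap.mpr ⟨fun i _ => ?_, ?_⟩
  · apply List.Nodup.map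
    · intro a b hab
      simpa using congrArg Prod.snd hab
    · exact List.Nodup.filter _ ((List.nodup_range).map (fun a b hab => Nat.cast_injective hab))
  · refine ((List.nodup_range).map (fun a b hab => Nat.cast_injective hab)).imp ?_
    intro i j hij a hai haj
    obtain ⟨x, _, rfl⟩ := List.mem_map.mp hai
    obtain ⟨y, _, hy⟩ := List.mem_map.mp haj
    apply hij
    have := congrArg Prod.fst hy
    simpa using this.symm

-- generic: flipping one true-filter element drops the filtered length by one
lemma filter_length_flip {α : Type} (l : List α) (p p' : α → Bool) (x : α) (hn : l.Nodup)
    (hx : x ∈ l) (hpx : p x) (hp'x : ¬ p' x) (hagree : ∀ y ∈ l, y ≠ x → p' y = p y) :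
    (l.filter p').length + 1 = (l.filter p).length := by
  induction l with
  | nil => simp at hx
  | cons a t ih =>
    simp at hn
    rcases List.mem_cons.mp hx with h1 | hx2
    · subst h1
      have : t.filter p' = t.filter p :=
        List.filter_congr (fun y hy => hagree y (List.mem_cons_of_mem _ hy) (by rintro rfl; exact hn.1 hy))
      simp [List.filter_cons, hpx, hp'x, this]
    · have hax : a ≠ x := by rintro rfl; exact hn.1 hx2
      have := ih hn.2 hx2 (fun y hy hyx => hagree y (List.mem_cons_of_mem _ hy) hyx)
      simp only [List.filter_cons, hagree a List.mem_cons_self hax]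
      by_cases hp : p a = true <;> simp [hp] <;> omega

-- ---- getCell / setCell ----
lemma Dims_setCell {h w : Int} {dist : List (List Int)} (hd : Dims h w dist)
    (i j v : Int) : Dims h w (setCell dist i j v) := by
  obtain ⟨hl, hr⟩ := hd
  constructor
  · simpa [setCell] using hl
  · intro r hrm
    rcases Nat.lt_or_ge i.toNat dist.length with hlt | hge
    · rcases List.mem_or_eq_of_mem_set hrm with hrm' | rfl
      · exact hr r hrm'
      · have : dist.getD i.toNat [] ∈ dist := by
          rw [List.getD_eq_getElem _ _ hlt]; exact List.getElem_mem _
        simpa using hr _ this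
    · unfold setCell at hrm
      rw [List.set_eq_of_length_le (by omega)] at hrm
      exact hr r hrm

lemma getCell_setCell {h w : Int} {dist : List (List Int)} (hd : Dims h w dist)
    {c x : Int × Int} (hc : inRect h w c) (hx : inRect h w x) (v : Int) :
    getCell (setCell dist c.1 c.2 v) x.1 x.2 = if x = c then v else getCell dist x.1 x.2 := by
  obtain ⟨hc1, hc2, hc3, hc4⟩ := hc
  obtain ⟨hx1, hx2, hx3, hx4⟩ := hx
  obtain ⟨hdl, hdr⟩ := hd
  have hcl : c.1.toNat < dist.length := by omega
  have hrow : dist.getD c.1.toNat [] ∈ dist := by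
    rw [List.getD_eq_getElem _ _ hcl]; exact List.getElem_mem _
  have hrl : (dist.getD c.1.toNat []).length = w.toNat := hdr _ hrow
  unfold getCell setCell
  by_cases h1 : x.1.toNat = c.1.toNat
  · rw [h1]
    have e1 : (dist.set c.1.toNat ((dist.getD c.1.toNat []).set c.2.toNat v)).getD c.1.toNat []
        = (dist.getD c.1.toNat []).set c.2.toNat v := by
      rw [List.getD_eq_getElem?_getD, List.getElem?_set_self (by simpa using hcl), Option.getD_some]
    rw [e1]
    by_cases h2 : x.2.toNat = c.2.toNat
    · have hxc : x = c := Prod.ext (by omega) (by omega)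
      have e2 : ((dist.getD c.1.toNat []).set c.2.toNat v).getD c.2.toNat (-1) = v := by
        rw [List.getD_eq_getElem?_getD, List.getElem?_set_self (by omega), Option.getD_some]
      rw [h2, e2, if_pos hxc]
    · have hxc : x ≠ c := by
        intro he; exact h2 (by rw [he])
      have e2 : ((dist.getD c.1.toNat []).set c.2.toNat v).getD x.2.toNat (-1)
          = (dist.getD c.1.toNat []).getD x.2.toNat (-1) := by
        rw [List.getD_eq_getElem?_getD, List.getElem?_set_ne (by omega), ← List.getD_eq_getElem?_getD]
      rw [e2, if_neg hxc]
  · have hxc : x ≠ c := by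
      intro he; exact h1 (by rw [he])
    have e1 : (dist.set c.1.toNat ((dist.getD c.1.toNat []).set c.2.toNat v)).getD x.1.toNat []
        = dist.getD x.1.toNat [] := by
      rw [List.getD_eq_getElem?_getD, List.getElem?_set_ne (by omega), ← List.getD_eq_getElem?_getD]
    rw [e1, if_neg hxc]

-- ---- seeding characterisation ----
def rowStep (grid : List (List String)) (i : Nat) :
    List (List Int) × List (Int × Int) → Nat → List (List Int) × List (Int × Int) :=
  fun st j =>
    if cellAt grid (i : Int) (j : Int) = "#" then
      (setCell st.1 (i : Int) (j : Int) 0, st.2 ++ [((i : Int), (j : Int))])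
    else st

def rowBlack (w : Int) (grid : List (List String)) (i : Nat) : List (Int × Int) :=
  ((List.range w.toNat).filter (fun (j : Nat) => decide (cellAt grid (i : Int) (j : Int) = "#"))).map
    (fun (j : Nat) => ((i : Int), (j : Int)))

lemma seed_row (h w : Int) (grid : List (List String)) (i : Nat) (hi : i < h.toNat) :
    ∀ (s : Nat), s ≤ w.toNat → ∀ (st : List (List Int) × List (Int × Int)), Dims h w st.1 →
      Dims h w ((List.range s).foldl (rowStep grid i) st).1 ∧
      ((List.range s).foldl (rowStep grid i) st).2 = st.2 ++
        (((List.range s).filter (fun (j : Nat) => decide (cellAt grid (i : Int) (j : Int) = "#"))).map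
          (fun (j : Nat) => ((i : Int), (j : Int)))) ∧
      (∀ c, inRect h w c →
        getCell ((List.range s).foldl (rowStep grid i) st).1 c.1 c.2 =
          if c.1 = (i : Int) ∧ c.2 < (s : Int) ∧ cellAt grid c.1 c.2 = "#" then 0
          else getCell st.1 c.1 c.2) := by
  intro s
  induction s with
  | zero =>
    intro _ st hd
    simp only [List.range_zero, List.foldl_nil]
    refine ⟨hd, by simp, fun c hc => ?_⟩
    obtain ⟨_, _, hc3, _⟩ := hc
    have : ¬ (c.1 = (i : Int) ∧ c.2 < ((0 : Nat) : Int) ∧ cellAt grid c.1 c.2 = "#") := by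
      rintro ⟨_, hlt, _⟩
      omega
    rw [if_neg this]
  | succ s ih =>
    intro hs st hd
    have hs' : s ≤ w.toNat := by omega
    obtain ⟨ihd, ihq, ihg⟩ := ih hs' st hd
    rw [List.range_succ, List.foldl_append]
    set st' := (List.range s).foldl (rowStep grid i) st with hst'
    have hirect : inRect h w ((i : Int), (s : Int)) := by
      unfold inRect
      exact ⟨by omega, by omega, by omega, by omega⟩
    by_cases hb : cellAt grid (i : Int) (s : Int) = "#"
    · have hstep : (List.foldl (rowStep grid i) st' [s]) =
          (setCell st'.1 (i : Int) (s : Int) 0, st'.2 ++ [((i : Int), (s : Int))]) := by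
        simp [rowStep, hb]
      rw [hstep]
      refine ⟨Dims_setCell ihd _ _ _, ?_, ?_⟩
      · simp [ihq, List.filter_append, hb]
      · intro c hc
        have hset := getCell_setCell (c := ((i : Int), (s : Int))) ihd hirect hc 0
        simp only at hset
        rw [hset, ihg c hc]
        by_cases hceq : c = ((i : Int), (s : Int))
        · rw [if_pos hceq]
          have hcond : c.1 = (i : Int) ∧ c.2 < ((s + 1 : Nat) : Int) ∧ cellAt grid c.1 c.2 = "#" := by
            subst hceq
            exact ⟨rfl, by show (s : Int) < ((s + 1 : Nat) : Int); omega, hb⟩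
          rw [if_pos hcond]
        · rw [if_neg hceq]
          have : (c.1 = (i : Int) ∧ c.2 < ((s + 1 : Nat) : Int) ∧ cellAt grid c.1 c.2 = "#") ↔
              (c.1 = (i : Int) ∧ c.2 < (s : Int) ∧ cellAt grid c.1 c.2 = "#") := by
            constructor
            · rintro ⟨h1, h2, h3⟩
              refine ⟨h1, ?_, h3⟩
              rcases lt_or_ge c.2 (s : Int) with hlt | hge
              · exact hlt
              · exfalso
                apply hceq
                exact Prod.ext h1 (by omega)
            · rintro ⟨h1, h2, h3⟩
              exact ⟨h1, by omega, h3⟩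
          rw [if_congr this rfl rfl]
    · have hstep : (List.foldl (rowStep grid i) st' [s]) = st' := by
        simp [rowStep, hb]
      rw [hstep]
      refine ⟨ihd, ?_, ?_⟩
      · rw [ihq]
        simp [List.filter_append, hb]
      · intro c hc
        rw [ihg c hc]
        have : (c.1 = (i : Int) ∧ c.2 < ((s + 1 : Nat) : Int) ∧ cellAt grid c.1 c.2 = "#") ↔
            (c.1 = (i : Int) ∧ c.2 < (s : Int) ∧ cellAt grid c.1 c.2 = "#") := by
          constructor
          · rintro ⟨h1, h2, h3⟩
            refine ⟨h1, ?_, h3⟩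
            rcases lt_or_ge c.2 (s : Int) with hlt | hge
            · exact hlt
            · exfalso
              have hc2 : c.2 = (s : Int) := by omega
              rw [h1, hc2] at h3
              exact hb h3
          · rintro ⟨h1, h2, h3⟩
            exact ⟨h1, by omega, h3⟩
        rw [if_congr this rfl rfl]

lemma getCell_init (h w : Int) (i j : Int) :
    getCell (List.replicate h.toNat (List.replicate w.toNat (-1 : Int))) i j = -1 := by
  unfold getCell
  rcases Nat.lt_or_ge i.toNat h.toNat with hlt | hge
  · rw [List.getD_replicate _ hlt]
    rcases Nat.lt_or_ge j.toNat w.toNat with h2 | h2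
    · rw [List.getD_replicate _ h2]
    · rw [List.getD_eq_default _ _ (by simpa using h2)]
  · have : (List.replicate h.toNat (List.replicate w.toNat (-1 : Int))).getD i.toNat [] = [] :=
      List.getD_eq_default _ _ (by simpa using hge)
    rw [this]
    rfl

lemma Dims_init (h w : Int) :
    Dims h w (List.replicate h.toNat (List.replicate w.toNat (-1 : Int))) := by
  constructor
  · simp
  · intro r hr
    rw [List.eq_of_mem_replicate hr]
    simp

lemma seed_outer (h w : Int) (grid : List (List String)) :
    ∀ (r : Nat), r ≤ h.toNat →
      Dims h w ((List.range r).foldl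
        (fun st (i : Nat) => (List.range w.toNat).foldl (rowStep grid i) st)
        (List.replicate h.toNat (List.replicate w.toNat (-1 : Int)), ([] : List (Int × Int)))).1 ∧
      ((List.range r).foldl
        (fun st (i : Nat) => (List.range w.toNat).foldl (rowStep grid i) st)
        (List.replicate h.toNat (List.replicate w.toNat (-1 : Int)), ([] : List (Int × Int)))).2
        = (List.range r).flatMap (rowBlack w grid) ∧
      (∀ c, inRect h w c →
        getCell ((List.range r).foldl
          (fun st (i : Nat) => (List.range w.toNat).foldl (rowStep grid i) st)
          (List.replicate h.toNat (List.replicate w.toNat (-1 : Int)), ([] : List (Int × Int)))).1 c.1 c.2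
          = if c.1 < (r : Int) ∧ cellAt grid c.1 c.2 = "#" then 0 else -1) := by
  intro r
  induction r with
  | zero =>
    intro _
    simp only [List.range_zero, List.foldl_nil]
    refine ⟨Dims_init h w, by simp, fun c hc => ?_⟩
    obtain ⟨hc1, _, _, _⟩ := hc
    rw [getCell_init, if_neg (by rintro ⟨hlt, _⟩; omega)]
  | succ r ih =>
    intro hr
    obtain ⟨ihd, ihq, ihg⟩ := ih (by omega)
    rw [List.range_succ, List.foldl_append]
    set st' := (List.range r).foldl
      (fun st (i : Nat) => (List.range w.toNat).foldl (rowStep grid i) st)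
      (List.replicate h.toNat (List.replicate w.toNat (-1 : Int)), ([] : List (Int × Int))) with hst'
    have hrow := seed_row h w grid r (by omega) w.toNat (le_refl _) st' ihd
    obtain ⟨rd, rq, rg⟩ := hrow
    simp only [List.foldl_cons, List.foldl_nil]
    refine ⟨rd, ?_, ?_⟩
    · rw [rq, ihq]
      simp [List.flatMap_append, rowBlack]
    · intro c hc
      rw [rg c hc, ihg c hc]
      obtain ⟨hc1, hc2, hc3, hc4⟩ := hc
      by_cases hb : cellAt grid c.1 c.2 = "#"
      · by_cases hcr : c.1 = (r : Int)
        · rw [if_pos ⟨hcr, by omega, hb⟩, if_pos ⟨by omega, hb⟩]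
        · rw [if_neg (by rintro ⟨e, _, _⟩; exact hcr e)]
          by_cases hlt : c.1 < (r : Int)
          · rw [if_pos ⟨hlt, hb⟩, if_pos ⟨by omega, hb⟩]
          · rw [if_neg (by rintro ⟨e, _⟩; exact hlt e),
              if_neg (by rintro ⟨e, _⟩; omega)]
      · rw [if_neg (by rintro ⟨_, _, e⟩; exact hb e),
          if_neg (by rintro ⟨_, e⟩; exact hb e),
          if_neg (by rintro ⟨_, e⟩; exact hb e)]

lemma blacksOf_eq_flatMap (h w : Int) (grid : List (List String)) :
    blacksOf h w grid = (List.range h.toNat).flatMap (rowBlack w grid) := by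
  unfold blacksOf rowBlack
  rw [pyRange_toNat h, pyRange_toNat w, List.flatMap_map]
  apply List.flatMap_congr
  intro i _
  rw [List.filter_map, List.map_map]
  rfl

lemma seed_spec (h w : Int) (grid : List (List String)) :
    ((List.range h.toNat).foldl
      (fun st (i : Nat) => (List.range w.toNat).foldl (rowStep grid i) st)
      (List.replicate h.toNat (List.replicate w.toNat (-1 : Int)), ([] : List (Int × Int)))).2
      = blacksOf h w grid ∧
    Dims h w ((List.range h.toNat).foldl
      (fun st (i : Nat) => (List.range w.toNat).foldl (rowStep grid i) st)
      (List.replicate h.toNat (List.replicate w.toNat (-1 : Int)), ([] : List (Int × Int)))).1 ∧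
    (∀ c, inRect h w c →
      getCell ((List.range h.toNat).foldl
        (fun st (i : Nat) => (List.range w.toNat).foldl (rowStep grid i) st)
        (List.replicate h.toNat (List.replicate w.toNat (-1 : Int)), ([] : List (Int × Int)))).1 c.1 c.2
        = (if cellAt grid c.1 c.2 = "#" then 0 else -1)) := by
  obtain ⟨hd, hq, hg⟩ := seed_outer h w grid h.toNat (le_refl _)
  refine ⟨by rw [hq, blacksOf_eq_flatMap], hd, fun c hc => ?_⟩
  rw [hg c hc]
  obtain ⟨hc1, hc2, _, _⟩ := hc
  by_cases hb : cellAt grid c.1 c.2 = "#"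
  · rw [if_pos ⟨by omega, hb⟩, if_pos hb]
  · rw [if_neg (by rintro ⟨_, e⟩; exact hb e), if_neg hb]

-- ---- the fold over the four directions ----
-- relation between the state before and after processing some of the directions
structure StepRel (h w : Int) (c : Int × Int) (dv : Int)
    (st0 st1 : List (List Int) × List (Int × Int)) : Prop where
  dims : Dims h w st1.1
  pres : ∀ x, inRect h w x → getCell st0.1 x.1 x.2 ≠ -1 →
      getCell st1.1 x.1 x.2 = getCell st0.1 x.1 x.2
  news : ∃ new, st1.2 = st0.2 ++ new ∧
      (∀ x ∈ new, x ∈ nbrs c ∧ inRect h w x ∧ getCell st0.1 x.1 x.2 = -1 ∧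
        getCell st1.1 x.1 x.2 = dv + 1) ∧
      (∀ x, inRect h w x → getCell st0.1 x.1 x.2 = -1 → getCell st1.1 x.1 x.2 ≠ -1 → x ∈ new) ∧
      unsetCnt h w st1.1 + new.length = unsetCnt h w st0.1
  qset : ∀ x ∈ st1.2, inRect h w x ∧ getCell st1.1 x.1 x.2 ≠ -1
  nodup : st1.2.Nodup

lemma StepRel.trans' {h w : Int} {c : Int × Int} {dv : Int}
    {st0 st1 st2 : List (List Int) × List (Int × Int)} (hdv : dv + 1 ≠ -1)
    (r1 : StepRel h w c dv st0 st1) (r2 : StepRel h w c dv st1 st2) :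
    StepRel h w c dv st0 st2 := by
  obtain ⟨n1, hq1, hn1, hc1, hu1⟩ := r1.news
  obtain ⟨n2, hq2, hn2, hc2, hu2⟩ := r2.news
  refine ⟨r2.dims, ?_, ⟨n1 ++ n2, ?_, ?_, ?_, ?_⟩, r2.qset, r2.nodup⟩
  · intro x hx hset
    rw [r2.pres x hx (by rw [r1.pres x hx hset]; exact hset), r1.pres x hx hset]
  · rw [hq2, hq1, List.append_assoc]
  · intro x hx
    rcases List.mem_append.mp hx with hx1 | hx2
    · obtain ⟨ha, hb, hc', hd⟩ := hn1 x hx1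
      exact ⟨ha, hb, hc', by rw [r2.pres x hb (by rw [hd]; exact hdv), hd]⟩
    · obtain ⟨ha, hb, hc', hd⟩ := hn2 x hx2
      refine ⟨ha, hb, ?_, hd⟩
      by_contra hne
      exact hne (by rw [← r1.pres x hb hne]; exact hc')
  · intro x hx h0 h2
    by_cases h1 : getCell st1.1 x.1 x.2 = -1
    · exact List.mem_append.mpr (Or.inr (hc2 x hx h1 h2))
    · exact List.mem_append.mpr (Or.inl (hc1 x hx h0 h1))
  · rw [List.length_append]
    omega

lemma StepRel.refl' {h w : Int} {c : Int × Int} {dv : Int}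
    {st0 : List (List Int) × List (Int × Int)} (hdims : Dims h w st0.1)
    (hq0 : ∀ x ∈ st0.2, inRect h w x ∧ getCell st0.1 x.1 x.2 ≠ -1) (hnd : st0.2.Nodup) :
    StepRel h w c dv st0 st0 :=
  ⟨hdims, fun _ _ _ => rfl, ⟨[], by simp, by simp, fun x _ h0 h1 => absurd h0 h1, by simp⟩,
    hq0, hnd⟩

-- a single direction
lemma one_step (h w : Int) (c : Int × Int) (dv : Int) (dr : Int × Int)
    (hdr : (c.1 + dr.1, c.2 + dr.2) ∈ nbrs c)
    (st0 : List (List Int) × List (Int × Int)) (hdims : Dims h w st0.1)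
    (hq0 : ∀ x ∈ st0.2, inRect h w x ∧ getCell st0.1 x.1 x.2 ≠ -1) (hnd : st0.2.Nodup)
    (hdv : dv + 1 ≠ -1) :
    StepRel h w c dv st0 (bfsStep h w c.1 c.2 dv st0 dr) ∧
    (inRect h w (c.1 + dr.1, c.2 + dr.2) →
      getCell (bfsStep h w c.1 c.2 dv st0 dr).1 (c.1 + dr.1) (c.2 + dr.2) ≠ -1) := by
  unfold bfsStep
  by_cases hout : c.1 + dr.1 < 0 ∨ h ≤ c.1 + dr.1 ∨ c.2 + dr.2 < 0 ∨ w ≤ c.2 + dr.2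
  · rw [if_pos hout]
    refine ⟨StepRel.refl' hdims hq0 hnd, fun hrect => ?_⟩
    exact absurd hout (by obtain ⟨a1, a2, a3, a4⟩ := hrect; push_neg; exact ⟨a1, a2, a3, a4⟩)
  · rw [if_neg hout]
    push_neg at hout
    have hrect : inRect h w (c.1 + dr.1, c.2 + dr.2) := ⟨hout.1, hout.2.1, hout.2.2.1, hout.2.2.2⟩
    by_cases hunset : getCell st0.1 (c.1 + dr.1) (c.2 + dr.2) = -1
    · rw [if_pos hunset]
      set m := ((c.1 + dr.1), (c.2 + dr.2)) with hm
      have hget : ∀ x : Int × Int, inRect h w x →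
          getCell (setCell st0.1 (c.1 + dr.1) (c.2 + dr.2) (dv + 1)) x.1 x.2 =
            if x = m then dv + 1 else getCell st0.1 x.1 x.2 := by
        intro x hx
        exact getCell_setCell (c := m) hdims hrect hx (dv + 1)
      have hgm : getCell (setCell st0.1 (c.1 + dr.1) (c.2 + dr.2) (dv + 1)) m.1 m.2 = dv + 1 := by
        rw [hget m hrect, if_pos rfl]
      constructor
      · refine ⟨Dims_setCell hdims _ _ _, ?_, ⟨[m], by simp, ?_, ?_, ?_⟩, ?_, ?_⟩
        · intro x hx hset
          rw [hget x hx]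
          rw [if_neg (by rintro rfl; exact hset hunset)]
        · intro x hx
          rw [List.mem_singleton] at hx
          subst hx
          exact ⟨hdr, hrect, hunset, hgm⟩
        · intro x hx h0 h1
          rw [List.mem_singleton]
          by_contra hne
          rw [hget x hx, if_neg hne] at h1
          exact h1 h0
        · have := filter_length_flip (rectL h w)
            (fun y => decide (getCell st0.1 y.1 y.2 = -1))
            (fun y => decide (getCell (setCell st0.1 (c.1 + dr.1) (c.2 + dr.2) (dv + 1)) y.1 y.2 = -1))
            m (nodup_rectL h w) (mem_rectL.mpr hrect) (by simpa using hunset)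
            (by simp [hgm, hdv])
            (fun y hyl hy => by
              have hyr : inRect h w y := mem_rectL.mp hyl
              rw [decide_eq_decide, hget y hyr, if_neg hy])
          unfold unsetCnt
          simpa using this
        · intro x hx
          rcases List.mem_append.mp hx with hx0 | hx1
          · obtain ⟨hr, hs⟩ := hq0 x hx0
            refine ⟨hr, ?_⟩
            rw [hget x hr, if_neg (by rintro rfl; exact hs hunset)]
            exact hs
          · rw [List.mem_singleton] at hx1
            subst hx1
            exact ⟨hrect, by rw [hgm]; exact hdv⟩
        · refine List.Nodup.append hnd (by simp) ?_
          intro x hx0 hx1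
          rw [List.mem_singleton] at hx1
          subst hx1
          exact (hq0 _ hx0).2 hunset
      · intro _
        exact fun he => hdv (hgm ▸ he)
    · rw [if_neg hunset]
      exact ⟨StepRel.refl' hdims hq0 hnd, fun _ => hunset⟩

lemma fold_step_spec (h w : Int) (c : Int × Int) (dv : Int)
    (st0 : List (List Int) × List (Int × Int)) (hdims : Dims h w st0.1)
    (hq0 : ∀ x ∈ st0.2, inRect h w x ∧ getCell st0.1 x.1 x.2 ≠ -1) (hnd : st0.2.Nodup)
    (hdv : dv + 1 ≠ -1) :
    StepRel h w c dv st0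
      ([((1 : Int), (0 : Int)), (0, 1), (-1, 0), (0, -1)].foldl (bfsStep h w c.1 c.2 dv) st0) ∧
    (∀ n ∈ nbrs c, inRect h w n →
      getCell ([((1 : Int), (0 : Int)), (0, 1), (-1, 0), (0, -1)].foldl
        (bfsStep h w c.1 c.2 dv) st0).1 n.1 n.2 ≠ -1) := by
  obtain ⟨r1, cov1⟩ := one_step h w c dv (1, 0) (by simp [nbrs]) st0 hdims hq0 hnd hdv
  set s1 := bfsStep h w c.1 c.2 dv st0 (1, 0) with hs1
  obtain ⟨r2, cov2⟩ := one_step h w c dv (0, 1) (by simp [nbrs]) s1 r1.dims r1.qset r1.nodup hdv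
  set s2 := bfsStep h w c.1 c.2 dv s1 (0, 1) with hs2
  have hm3 : ((c.1 + (-1 : Int), c.2 + (0 : Int))) ∈ nbrs c := by
    have : ((c.1 + (-1 : Int), c.2 + (0 : Int))) = (c.1 - 1, c.2) :=
      Prod.ext (by ring) (by ring)
    rw [this]
    simp [nbrs]
  obtain ⟨r3, cov3⟩ := one_step h w c dv (-1, 0) hm3 s2 r2.dims r2.qset r2.nodup hdv
  set s3 := bfsStep h w c.1 c.2 dv s2 (-1, 0) with hs3
  have hm4 : ((c.1 + (0 : Int), c.2 + (-1 : Int))) ∈ nbrs c := by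
    have : ((c.1 + (0 : Int), c.2 + (-1 : Int))) = (c.1, c.2 - 1) :=
      Prod.ext (by ring) (by ring)
    rw [this]
    simp [nbrs]
  obtain ⟨r4, cov4⟩ := one_step h w c dv (0, -1) hm4 s3 r3.dims r3.qset r3.nodup hdv
  set s4 := bfsStep h w c.1 c.2 dv s3 (0, -1) with hs4
  have e : [((1 : Int), (0 : Int)), (0, 1), (-1, 0), (0, -1)].foldl (bfsStep h w c.1 c.2 dv) st0
      = s4 := rfl
  rw [e]
  have keep2 : ∀ n, inRect h w n → getCell s2.1 n.1 n.2 ≠ -1 → getCell s4.1 n.1 n.2 ≠ -1 := by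
    intro n hr hset
    have h3 : getCell s3.1 n.1 n.2 ≠ -1 := by rw [r3.pres n hr hset]; exact hset
    rw [r4.pres n hr h3]
    exact h3
  have keep1 : ∀ n, inRect h w n → getCell s1.1 n.1 n.2 ≠ -1 → getCell s4.1 n.1 n.2 ≠ -1 := by
    intro n hr hset
    refine keep2 n hr ?_
    rw [r2.pres n hr hset]
    exact hset
  refine ⟨StepRel.trans' hdv (StepRel.trans' hdv (StepRel.trans' hdv r1 r2) r3) r4, ?_⟩
  intro n hn hrect
  have e1 : ((c.1 + (1 : Int), c.2 + (0 : Int))) = (c.1 + 1, c.2) := Prod.ext rfl (by ring)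
  have e2 : ((c.1 + (0 : Int), c.2 + (1 : Int))) = (c.1, c.2 + 1) := Prod.ext (by ring) rfl
  have e3 : ((c.1 + (-1 : Int), c.2 + (0 : Int))) = (c.1 - 1, c.2) := Prod.ext (by ring) (by ring)
  have e4 : ((c.1 + (0 : Int), c.2 + (-1 : Int))) = (c.1, c.2 - 1) := Prod.ext (by ring) (by ring)
  simp only [nbrs, List.mem_cons, List.not_mem_nil, or_false] at hn
  rcases hn with rfl | rfl | rfl | rfl
  · exact keep1 _ hrect (by rw [← e1] at hrect ⊢; exact cov1 hrect)
  · exact keep2 _ hrect (by rw [← e2] at hrect ⊢; exact cov2 hrect)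
  · rw [← e3] at hrect ⊢
    have h3 : getCell s3.1 (c.1 + -1) (c.2 + 0) ≠ -1 := cov3 hrect
    rw [r4.pres _ hrect h3]
    exact h3
  · rw [← e4] at hrect ⊢
    exact cov4 hrect

-- ---- completeness at termination ----
lemma complete_of_empty {h w : Int} {grid : List (List String)} {dist : List (List Int)} {d : Int}
    (hS : blacksOf h w grid ≠ []) (hInv : BfsInv h w grid dist [] d) :
    ∀ c, inRect h w c → getCell dist c.1 c.2 ≠ -1 := by
  have hSr : ∀ b ∈ blacksOf h w grid, inRect h w b := fun b hb => (mem_blacksOf.mp hb).1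
  have key : ∀ m : Nat, ∀ c, inRect h w c → (nearMin c (blacksOf h w grid)).toNat = m →
      getCell dist c.1 c.2 ≠ -1 := by
    intro m
    induction m using Nat.strong_induction_on with
    | _ m ih =>
      intro c hc hm
      by_cases h0 : nearMin c (blacksOf h w grid) = 0
      · exact hInv.seeds c (nearMin_eq_zero_mem hS h0)
      · have hpos : 0 < nearMin c (blacksOf h w grid) :=
          lt_of_le_of_ne (nearMin_nonneg hS) (Ne.symm h0)
        obtain ⟨n, hnmem, hnrect, hnval⟩ := exists_nbr_closer hS hSr hc hpos
        have hnn := nearMin_nonneg (c := n) hS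
        have hnset := ih (nearMin n (blacksOf h w grid)).toNat (by omega) n hnrect rfl
        exact hInv.proc n hnrect hnset (by simp) c (nbrs_symm hnmem) hc
  exact fun c hc => key _ c hc rfl

-- ---- the main BFS induction ----
lemma bfs_main (h w : Int) (grid : List (List String)) (hS : blacksOf h w grid ≠ []) :
    ∀ fuel dist q d, BfsInv h w grid dist q d → 5 * unsetCnt h w dist + q.length < fuel →
      ResChar h w grid (bfsLoop h w fuel dist q d) := by
  intro fuel
  induction fuel with
  | zero => intro dist q d _ hfuel; omega
  | succ fuel ih =>
    intro dist q d hInv hfuel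
    match q with
    | [] =>
      have hcomp := complete_of_empty hS hInv
      show ResChar h w grid d
      refine ⟨hInv.dpos, ?_, ?_⟩
      · intro c hc
        exact hInv.dbound c hc (hcomp c hc) (by simp)
      · rcases hInv.dwit with h0 | ⟨c, hc, _, _, hv⟩
        · exact Or.inl h0
        · exact Or.inr ⟨c, hc, hv⟩
    | (hh, ww) :: rest =>
      -- level structure of the queue
      rcases hInv.shape with hqnil | ⟨k, qa, qb, hqeq, hqane, hdk, hlva, hlvb, hclosed⟩
      · simp at hqnil
      obtain ⟨hcrect, hcval⟩ := hInv.qmem (hh, ww) List.mem_cons_self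
      rcases qa with _ | ⟨qh, qa'⟩
      · exact absurd rfl hqane
      rw [List.cons_append] at hqeq
      injection hqeq with h1 h2
      subst h1
      have hk : nearMin (hh, ww) (blacksOf h w grid) = k := hlva _ List.mem_cons_self
      have hk0 : 0 ≤ k := hk ▸ nearMin_nonneg hS
      have hgc : getCell dist hh ww = k := by
        have : getCell dist (hh, ww).1 (hh, ww).2 = k := hcval.trans hk
        simpa using this
      show ResChar h w grid (bfsLoop h w (fuel + 1) dist ((hh, ww) :: rest) d)
      have hred : bfsLoop h w (fuel + 1) dist ((hh, ww) :: rest) d =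
          bfsLoop h w fuel
            ([((1 : Int), (0 : Int)), (0, 1), (-1, 0), (0, -1)].foldl
              (bfsStep h w hh ww (getCell dist hh ww)) (dist, rest)).1
            ([((1 : Int), (0 : Int)), (0, 1), (-1, 0), (0, -1)].foldl
              (bfsStep h w hh ww (getCell dist hh ww)) (dist, rest)).2
            (getCell dist hh ww) := rfl
      rw [hred, hgc]
      -- the four-direction fold
      have hq0 : ∀ x ∈ ((dist, rest) : List (List Int) × List (Int × Int)).2,
          inRect h w x ∧ getCell ((dist, rest) : List (List Int) × List (Int × Int)).1 x.1 x.2 ≠ -1 := by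
        intro x hx
        obtain ⟨hr, hv⟩ := hInv.qmem x (List.mem_cons_of_mem _ hx)
        have := nearMin_nonneg (c := x) hS
        exact ⟨hr, by simp only; rw [hv]; omega⟩
      have hdv : k + 1 ≠ -1 := by omega
      obtain ⟨R, cov⟩ := fold_step_spec h w (hh, ww) k (dist, rest) hInv.dims hq0
        (hInv.nodup.of_cons) hdv
      set st1 := [((1 : Int), (0 : Int)), (0, 1), (-1, 0), (0, -1)].foldl
        (bfsStep h w (hh, ww).1 (hh, ww).2 k) ((dist, rest) : List (List Int) × List (Int × Int)) with hst1
      obtain ⟨new, hq1, hnew, hconv, hcnt⟩ := R.news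
      simp only at hq1 hcnt
      -- every newly discovered cell is exactly one level further out
      have hnewlvl : ∀ x ∈ new, nearMin x (blacksOf h w grid) = k + 1 := by
        intro x hx
        obtain ⟨hnbr, hrect, hunset, _⟩ := hnew x hx
        have hle : nearMin x (blacksOf h w grid) ≤ k + 1 := by
          have := nearMin_nbr_le hS hnbr
          omega
        have hgt : ¬ nearMin x (blacksOf h w grid) ≤ k :=
          fun hc' => (hclosed x hrect hc') (by simpa using hunset)
        omega
      have hheadset : getCell st1.1 hh ww ≠ -1 := by
        have : getCell st1.1 (hh, ww).1 (hh, ww).2 = getCell dist (hh, ww).1 (hh, ww).2 :=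
          R.pres (hh, ww) hcrect (by simpa [hgc] using (by omega : (k : Int) ≠ -1))
        simp only at this
        rw [this, hgc]
        omega
      have hheadnotq1 : (hh, ww) ∉ st1.2 := by
        rw [hq1]
        intro hmem
        rcases List.mem_append.mp hmem with hr | hn
        · exact (List.nodup_cons.mp hInv.nodup).1 hr
        · obtain ⟨_, _, hunset, _⟩ := hnew _ hn
          simp only at hunset
          rw [hgc] at hunset
          omega
      -- rebuild the invariant for the next state
      have hvals : ∀ c, inRect h w c → getCell st1.1 c.1 c.2 = -1 ∨
          getCell st1.1 c.1 c.2 = nearMin c (blacksOf h w grid) := by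
        intro c hc
        by_cases h0 : getCell dist c.1 c.2 = -1
        · by_cases h1 : getCell st1.1 c.1 c.2 = -1
          · exact Or.inl h1
          · have hmem := hconv c hc h0 h1
            obtain ⟨_, _, _, hval⟩ := hnew c hmem
            exact Or.inr (by rw [hval, hnewlvl c hmem])
        · rcases hInv.vals c hc with h2 | h2
          · exact absurd h2 h0
          · exact Or.inr (by rw [R.pres c hc h0]; exact h2)
      have hseeds : ∀ s' ∈ blacksOf h w grid, getCell st1.1 s'.1 s'.2 ≠ -1 := by
        intro s' hs'
        have hr := (mem_blacksOf.mp hs').1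
        have h0 := hInv.seeds s' hs'
        rw [R.pres s' hr h0]
        exact h0
      have hqmem : ∀ c ∈ st1.2, inRect h w c ∧
          getCell st1.1 c.1 c.2 = nearMin c (blacksOf h w grid) := by
        intro c hc
        rw [hq1] at hc
        rcases List.mem_append.mp hc with hr | hn
        · obtain ⟨hrect, hval⟩ := hInv.qmem c (List.mem_cons_of_mem _ hr)
          have hnn := nearMin_nonneg (c := c) hS
          refine ⟨hrect, ?_⟩
          rw [R.pres c hrect (by rw [hval]; omega)]
          exact hval
        · obtain ⟨_, hrect, _, hval⟩ := hnew c hn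
          exact ⟨hrect, by rw [hval, hnewlvl c hn]⟩
      have hproc : ∀ x, inRect h w x → getCell st1.1 x.1 x.2 ≠ -1 → x ∉ st1.2 →
          ∀ n ∈ nbrs x, inRect h w n → getCell st1.1 n.1 n.2 ≠ -1 := by
        intro x hx hset1 hnotq1 n hn hnrect
        by_cases h0 : getCell dist x.1 x.2 = -1
        · exact absurd (hq1 ▸ List.mem_append.mpr (Or.inr (hconv x hx h0 hset1))) hnotq1
        · by_cases hxc : x = (hh, ww)
          · subst hxc
            exact cov n hn hnrect
          · have hxq : x ∉ (hh, ww) :: rest := by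
              intro hmem
              rcases List.mem_cons.mp hmem with h' | h'
              · exact hxc h'
              · exact hnotq1 (hq1 ▸ List.mem_append.mpr (Or.inl h'))
            have h2 := hInv.proc x hx h0 hxq n hn hnrect
            rw [R.pres n hnrect h2]
            exact h2
      have hdbound : ∀ c, inRect h w c → getCell st1.1 c.1 c.2 ≠ -1 → c ∉ st1.2 →
          nearMin c (blacksOf h w grid) ≤ k := by
        intro c hc hset1 hnotq1
        by_cases h0 : getCell dist c.1 c.2 = -1
        · exact absurd (hq1 ▸ List.mem_append.mpr (Or.inr (hconv c hc h0 hset1))) hnotq1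
        · by_cases hxc : c = (hh, ww)
          · subst hxc
            rw [hk]
          · have hxq : c ∉ (hh, ww) :: rest := by
              intro hmem
              rcases List.mem_cons.mp hmem with h' | h'
              · exact hxc h'
              · exact hnotq1 (hq1 ▸ List.mem_append.mpr (Or.inl h'))
            have := hInv.dbound c hc h0 hxq
            omega
      have hdwit : ∃ c, inRect h w c ∧ getCell st1.1 c.1 c.2 ≠ -1 ∧ c ∉ st1.2 ∧
          nearMin c (blacksOf h w grid) = k :=
        ⟨(hh, ww), hcrect, by simpa using hheadset, hheadnotq1, hk⟩
      have hshape : st1.2 = [] ∨ ∃ k' qa qb, st1.2 = qa ++ qb ∧ qa ≠ [] ∧ (k : Int) ≤ k' ∧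
          (∀ c ∈ qa, nearMin c (blacksOf h w grid) = k') ∧
          (∀ c ∈ qb, nearMin c (blacksOf h w grid) = k' + 1) ∧
          (∀ c, inRect h w c → nearMin c (blacksOf h w grid) ≤ k' →
            getCell st1.1 c.1 c.2 ≠ -1) := by
        have hrest : rest = qa' ++ qb := h2
        rcases qa' with _ | ⟨y, qa''⟩
        · simp only [List.nil_append] at hrest
          by_cases hempty : st1.2 = []
          · exact Or.inl hempty
          · refine Or.inr ⟨k + 1, qb ++ new, [], by rw [hq1, hrest, List.append_nil], ?_,
              by omega, ?_, by simp, ?_⟩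
            · rw [hq1, hrest] at hempty
              exact hempty
            · intro c hc
              rcases List.mem_append.mp hc with h' | h'
              · exact hlvb c h'
              · exact hnewlvl c h'
            · intro c hc hle
              rcases lt_or_ge (nearMin c (blacksOf h w grid)) (k + 1) with hlt | hge
              · have h0 := hclosed c hc (by omega)
                rw [R.pres c hc h0]
                exact h0
              · have heq : nearMin c (blacksOf h w grid) = k + 1 := by omega
                have hSr : ∀ b ∈ blacksOf h w grid, inRect h w b :=
                  fun b hb => (mem_blacksOf.mp hb).1
                obtain ⟨n, hnmem, hnrect, hnval⟩ := exists_nbr_closer hS hSr hc (by omega)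
                have hnk : nearMin n (blacksOf h w grid) = k := by omega
                have hnset : getCell st1.1 n.1 n.2 ≠ -1 := by
                  have h0 := hclosed n hnrect (by omega)
                  rw [R.pres n hnrect h0]
                  exact h0
                have hnnotq : n ∉ st1.2 := by
                  intro hmem
                  have := (hqmem n hmem).2
                  rcases List.mem_append.mp (by rw [hq1, hrest] at hmem; exact hmem) with h' | h'
                  · have := hlvb n h'
                    omega
                  · have := hnewlvl n h'
                    omega
                exact hproc n hnrect hnset hnnotq c (nbrs_symm hnmem) hc
        · refine Or.inr ⟨k, y :: qa'', qb ++ new, ?_, by simp, le_refl _, ?_, ?_, ?_⟩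
          · rw [hq1, hrest, List.append_assoc]
          · intro c hc
            exact hlva c (List.mem_cons_of_mem _ hc)
          · intro c hc
            rcases List.mem_append.mp hc with h' | h'
            · exact hlvb c h'
            · exact hnewlvl c h'
          · intro c hc hle
            have h0 := hclosed c hc hle
            rw [R.pres c hc h0]
            exact h0
      have hInv1 : BfsInv h w grid st1.1 st1.2 k :=
        ⟨R.dims, hvals, hseeds, hqmem, R.nodup, hproc, hk0, hdbound, Or.inr hdwit, hshape⟩
      apply ih st1.1 st1.2 k hInv1
      have hlen : st1.2.length = rest.length + new.length := by
        rw [hq1, List.length_append]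
      simp only [List.length_cons] at hfuel
      omega

-- ---- characterisation of B ----
lemma foldl_if_mono (f : Int → Int) :
    ∀ (l : List Int) (b : Int), b ≤ l.foldl (fun best j => if best < f j then f j else best) b := by
  intro l
  induction l with
  | nil => intro b; simp
  | cons y t ih =>
    intro b
    simp only [List.foldl_cons]
    refine le_trans ?_ (ih _)
    split <;> omega

lemma alt_inner (h w : Int) (S : List (Int × Int)) (i : Int) (hi : 0 ≤ i ∧ i < h) :
    ∀ (lj : List Int), (∀ j ∈ lj, 0 ≤ j ∧ j < w) → ∀ (best : Int), 0 ≤ best →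
      (best = 0 ∨ ∃ c, inRect h w c ∧ nearMin c S = best) →
      best ≤ lj.foldl (fun best j =>
          if best < nearMin (i, j) S then nearMin (i, j) S else best) best ∧
      0 ≤ lj.foldl (fun best j =>
          if best < nearMin (i, j) S then nearMin (i, j) S else best) best ∧
      (lj.foldl (fun best j =>
          if best < nearMin (i, j) S then nearMin (i, j) S else best) best = 0 ∨
        ∃ c, inRect h w c ∧ nearMin c S = lj.foldl (fun best j =>
          if best < nearMin (i, j) S then nearMin (i, j) S else best) best) ∧
      (∀ j ∈ lj, nearMin (i, j) S ≤ lj.foldl (fun best j =>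
          if best < nearMin (i, j) S then nearMin (i, j) S else best) best) := by
  intro lj
  induction lj with
  | nil => intro _ best hb hwit; exact ⟨le_refl _, hb, hwit, by simp⟩
  | cons j t ihj =>
    intro hlj best hb hwit
    simp only [List.foldl_cons]
    by_cases hlt : best < nearMin (i, j) S
    · rw [if_pos hlt]
      have hj := hlj j List.mem_cons_self
      have hrect : inRect h w (i, j) := ⟨hi.1, hi.2, hj.1, hj.2⟩
      obtain ⟨g1, g2, g3, g4⟩ := ihj (fun x hx => hlj x (List.mem_cons_of_mem _ hx))
        (nearMin (i, j) S) (by omega) (Or.inr ⟨(i, j), hrect, rfl⟩)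
      exact ⟨by omega, g2, g3, fun x hx => by
        rcases List.mem_cons.mp hx with rfl | hx'
        · exact g1
        · exact g4 x hx'⟩
    · rw [if_neg hlt]
      obtain ⟨g1, g2, g3, g4⟩ := ihj (fun x hx => hlj x (List.mem_cons_of_mem _ hx)) best hb hwit
      exact ⟨g1, g2, g3, fun x hx => by
        rcases List.mem_cons.mp hx with rfl | hx'
        · omega
        · exact g4 x hx'⟩

lemma alt_outer (h w : Int) (S : List (Int × Int)) :
    ∀ (li : List Int), (∀ i ∈ li, 0 ≤ i ∧ i < h) → ∀ (best : Int), 0 ≤ best →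
      (best = 0 ∨ ∃ c, inRect h w c ∧ nearMin c S = best) →
      0 ≤ li.foldl (fun best i => (PySem.List.pyRange 0 w 1).foldl (fun best j =>
          if best < nearMin (i, j) S then nearMin (i, j) S else best) best) best ∧
      (li.foldl (fun best i => (PySem.List.pyRange 0 w 1).foldl (fun best j =>
          if best < nearMin (i, j) S then nearMin (i, j) S else best) best) best = 0 ∨
        ∃ c, inRect h w c ∧ nearMin c S = li.foldl (fun best i =>
          (PySem.List.pyRange 0 w 1).foldl (fun best j =>
            if best < nearMin (i, j) S then nearMin (i, j) S else best) best) best) ∧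
      (∀ i ∈ li, ∀ j, 0 ≤ j → j < w → nearMin (i, j) S ≤ li.foldl (fun best i =>
          (PySem.List.pyRange 0 w 1).foldl (fun best j =>
            if best < nearMin (i, j) S then nearMin (i, j) S else best) best) best) := by
  intro li
  induction li with
  | nil => intro _ best hb hwit; exact ⟨hb, hwit, by simp⟩
  | cons i t ihi =>
    intro hli best hb hwit
    simp only [List.foldl_cons]
    have hi := hli i List.mem_cons_self
    have hw' : ∀ j ∈ PySem.List.pyRange 0 w 1, 0 ≤ j ∧ j < w := by
      intro j hj
      exact PySem.List.mem_pyRange_one.mp hj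
    obtain ⟨g1, g2, g3, g4⟩ := alt_inner h w S i hi (PySem.List.pyRange 0 w 1) hw' best hb hwit
    obtain ⟨o1, o2, o3⟩ := ihi (fun x hx => hli x (List.mem_cons_of_mem _ hx)) _ g2 g3
    refine ⟨o1, o2, fun x hx j hj1 hj2 => ?_⟩
    rcases List.mem_cons.mp hx with rfl | hx'
    · -- handled by the inner fold, then carried over by monotonicity of the outer fold
      have hmono : ∀ (l : List Int) (b : Int), b ≤ l.foldl (fun best i =>
          (PySem.List.pyRange 0 w 1).foldl (fun best j =>
            if best < nearMin (i, j) S then nearMin (i, j) S else best) best) b := by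
        intro l
        induction l with
        | nil => intro b; simp
        | cons y yt ihy =>
          intro b
          simp only [List.foldl_cons]
          exact le_trans (foldl_if_mono (fun j => nearMin (y, j) S) _ b) (ihy _)
      have hinner := g4 j (PySem.List.mem_pyRange_one.mpr ⟨hj1, hj2⟩)
      exact le_trans hinner (hmono t _)
    · exact o3 x hx' j hj1 hj2

lemma alt_char (h w : Int) (grid : List (List String)) (hS : blacksOf h w grid ≠ []) :
    ResChar h w grid (calc_py_alt h w grid) := by
  rcases hE : blacksOf h w grid with _ | ⟨b, bs⟩
  · exact absurd hE hS
  · have hred : calc_py_alt h w grid = (PySem.List.pyRange 0 h 1).foldl (fun best i =>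
        (PySem.List.pyRange 0 w 1).foldl (fun best j =>
          if best < nearMin (i, j) (blacksOf h w grid) then nearMin (i, j) (blacksOf h w grid)
          else best) best) 0 := by
      unfold calc_py_alt
      rw [hE]
    rw [hred, hE]
    obtain ⟨o1, o2, o3⟩ := alt_outer h w (b :: bs) (PySem.List.pyRange 0 h 1)
      (fun i hi => PySem.List.mem_pyRange_one.mp hi) 0 (le_refl _) (Or.inl rfl)
    refine ⟨o1, ?_, ?_⟩
    · intro c hc
      obtain ⟨hc1, hc2, hc3, hc4⟩ := hc
      have := o3 c.1 (PySem.List.mem_pyRange_one.mpr ⟨hc1, hc2⟩) c.2 hc3 hc4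
      rw [hE]
      exact this
    · rw [hE]
      exact o2
-- ===== VERDICT (by name: the statement is the Claim_ definition above) =====
theorem calc_py_spec : Claim_equal_calc_py := by
  intro h w grid _ _
  unfold Spec_calc_py
  obtain ⟨hq, hd, hg⟩ := seed_spec h w grid
  set E := (List.range h.toNat).foldl
    (fun st (i : Nat) => (List.range w.toNat).foldl (rowStep grid i) st)
    (List.replicate h.toNat (List.replicate w.toNat (-1 : Int)), ([] : List (Int × Int))) with hE
  have hmap : ((List.range h.toNat).map (fun _ => List.replicate w.toNat (-1 : Int)))
      = List.replicate h.toNat (List.replicate w.toNat (-1 : Int)) := by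
    simp
  have hA : calc_py h w grid = bfsLoop h w (6 * (h.toNat * w.toNat) + 1) E.1 E.2 0 := by
    rw [hE, ← hmap]
    rfl
  by_cases hSe : blacksOf h w grid = []
  · have hq0 : E.2 = [] := by rw [hq, hSe]
    have hz : ∀ (n : Nat) (dist : List (List Int)) (d : Int),
        bfsLoop h w (n + 1) dist [] d = d := fun _ _ _ => rfl
    have hB : calc_py_alt h w grid = 0 := by
      unfold calc_py_alt
      rw [hSe]
    rw [hA, hq0, hz, hB]
  · have hseedset : ∀ s ∈ blacksOf h w grid, getCell E.1 s.1 s.2 = 0 := by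
      intro s hs
      obtain ⟨hr, hb⟩ := mem_blacksOf.mp hs
      rw [hg s hr, if_pos hb]
    have hblack : ∀ c, inRect h w c → getCell E.1 c.1 c.2 ≠ -1 → c ∈ blacksOf h w grid := by
      intro c hc hset
      by_cases hb : cellAt grid c.1 c.2 = "#"
      · exact mem_blacksOf.mpr ⟨hc, hb⟩
      · rw [hg c hc, if_neg hb] at hset
        exact absurd rfl hset
    have hinv : BfsInv h w grid E.1 E.2 0 := by
      refine ⟨hd, ?_, ?_, ?_, ?_, ?_, le_refl 0, ?_, Or.inl rfl, ?_⟩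
      · intro c hc
        by_cases hb : cellAt grid c.1 c.2 = "#"
        · refine Or.inr ?_
          have hmem : c ∈ blacksOf h w grid := mem_blacksOf.mpr ⟨hc, hb⟩
          rw [hseedset c hmem, (nearMin_mem_zero hmem).symm]
        · exact Or.inl (by rw [hg c hc, if_neg hb])
      · intro s hs
        rw [hseedset s hs]
        decide
      · intro c hc
        rw [hq] at hc
        exact ⟨(mem_blacksOf.mp hc).1, by rw [hseedset c hc, nearMin_mem_zero hc]⟩
      · rw [hq]
        exact nodup_blacksOf h w grid
      · intro x hx hset hnot
        exact absurd (by rw [hq]; exact hblack x hx hset) hnot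
      · intro c hc hset hnot
        exact absurd (by rw [hq]; exact hblack c hc hset) hnot
      · refine Or.inr ⟨0, blacksOf h w grid, [], by rw [hq, List.append_nil], hSe, le_refl 0,
          fun c hc => nearMin_mem_zero hc, by simp, ?_⟩
        intro c hc hle
        have h0 : nearMin c (blacksOf h w grid) = 0 :=
          le_antisymm hle (nearMin_nonneg hSe)
        have hmem := nearMin_eq_zero_mem hSe h0
        rw [hseedset c hmem]
        decide
    have hcard : (blacksOf h w grid).length ≤ (rectL h w).length :=
      (List.subperm_of_subset (nodup_blacksOf h w grid)
        (fun x hx => mem_rectL.mpr (mem_blacksOf.mp hx).1)).length_le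
    have hcnt : unsetCnt h w E.1 ≤ (rectL h w).length := List.length_filter_le _ _
    have hlenr := length_rectL h w
    have hmeas : 5 * unsetCnt h w E.1 + E.2.length < 6 * (h.toNat * w.toNat) + 1 := by
      rw [hq]
      omega
    have hcharA : ResChar h w grid (calc_py h w grid) := by
      rw [hA]
      exact bfs_main h w grid hSe _ E.1 E.2 0 hinv hmeas
    exact char_unique hcharA (alt_char h w grid hSe)
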